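-- pv_equiv track=rewrite | github.com/jinnie75/speech_depth | src/asr_viz/services/archive_previews.py | _extract_word_ranges
-- ===== SOURCE A (Python) =====
-- def _extract_word_ranges(text: str) -> list[dict[str, int]]:
--     ranges: list[dict[str, int]] = []
--     in_word = False
--     word_start = 0
--
--     for index, character in enumerate(text):
--         if character.isspace():
--             if in_word:
--                 ranges.append({"start": word_start, "end": index})
--                 in_word = False
--             continue
--         if not in_word:
--             word_start = index
--             in_word = True
--
--     if in_word:
--         ranges.append({"start": word_start, "end": len(text)})
--
--     return ranges
-- ===== SOURCE B (Python) =====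
-- def _extract_word_ranges(text: str) -> list[dict[str, int]]:
--     ranges: list[dict[str, int]] = []
--     n = len(text)
--     i = 0
--     while i < n:
--         if text[i].isspace():
--             i += 1
--             continue
--         j = i
--         while j < n and not text[j].isspace():
--             j += 1
--         ranges.append({"start": i, "end": j})
--         i = j
--     return ranges
-- ===== Notes on version B (the rewrite author's own statement) =====
-- stated objective: alternative
-- what changed: Replaced the in_word/word_start boolean state machine over enumerate with a two-pointer run scanner: skip a whitespace char or scan a whole non-whitespace run at once and emit its range directly.
import Mathlib
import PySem

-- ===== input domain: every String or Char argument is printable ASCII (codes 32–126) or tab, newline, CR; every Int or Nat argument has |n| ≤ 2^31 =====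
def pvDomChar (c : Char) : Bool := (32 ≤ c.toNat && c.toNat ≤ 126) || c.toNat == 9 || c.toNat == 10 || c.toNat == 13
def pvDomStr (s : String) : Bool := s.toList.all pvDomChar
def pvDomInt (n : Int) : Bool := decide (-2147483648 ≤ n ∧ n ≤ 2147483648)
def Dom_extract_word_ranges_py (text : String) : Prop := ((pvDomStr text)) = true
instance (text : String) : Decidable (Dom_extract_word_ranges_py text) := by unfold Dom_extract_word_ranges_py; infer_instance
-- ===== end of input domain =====

-- B replaces A's in_word/word_start state machine by a two-pointer run scanner (alternative decomposition, same cost).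

-- ===== PORT A =====
-- A's for-loop over enumerate(text) with state (ranges, in_word, word_start), as structural recursion over the same state.
def pvARange (s e : Int) : List (String × Int) := [("start", s), ("end", e)]

def pvALoop (cs : List Char) (i : Int) (inWord : Bool) (wordStart : Int)
    (ranges : List (List (String × Int))) : List (List (String × Int)) :=
  match cs with
  | [] => if inWord then ranges ++ [pvARange wordStart i] else ranges
  | c :: rest =>
    if PySem.Chars.isspace c then
      pvALoop rest (i + 1) false wordStart
        (if inWord then ranges ++ [pvARange wordStart i] else ranges)
    else
      pvALoop rest (i + 1) true (if inWord then wordStart else i) ranges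

def extract_word_ranges_py (text : String) : List (List (String × Int)) :=
  pvALoop text.toList 0 false 0 []

-- ===== PORT B =====
-- inner 'while j < n and not text[j].isspace(): j += 1': length of the non-space prefix and the remainder
def pvBWord (cs : List Char) : Nat × List Char :=
  match cs with
  | [] => (0, [])
  | c :: rest =>
    if PySem.Chars.isspace c then (0, c :: rest)
    else let p := pvBWord rest; (p.1 + 1, p.2)

theorem pvBWord_len_le (cs : List Char) : (pvBWord cs).2.length ≤ cs.length := by
  induction cs with
  | nil => simp [pvBWord]
  | cons c rest ih =>
    simp only [pvBWord]
    split
    · simp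
    · simpa using Nat.le_succ_of_le ih

-- outer while loop: skip one space char, or emit a whole word run
def pvBLoop (cs : List Char) (i : Int) : List (List (String × Int)) :=
  match h : cs with
  | [] => []
  | c :: rest =>
    if PySem.Chars.isspace c then pvBLoop rest (i + 1)
    else
      let p := pvBWord rest
      [("start", i), ("end", i + 1 + (p.1 : Int))] :: pvBLoop p.2 (i + 1 + (p.1 : Int))
  termination_by cs.length
  decreasing_by
    · simp
    · simpa using Nat.lt_succ_of_le (pvBWord_len_le rest)

def extract_word_ranges_py_alt (text : String) : List (List (String × Int)) :=
  pvBLoop text.toList 0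

-- ===== PRECONDITION & SPEC =====
def Spec_extract_word_ranges_py (text : String) (out : List (List (String × Int))) : Prop := out = extract_word_ranges_py_alt text
instance (text : String) (out : List (List (String × Int))) : Decidable (Spec_extract_word_ranges_py text out) := by unfold Spec_extract_word_ranges_py; infer_instance

-- ===== CLAIM (what is proved, stated in full; the proofs are below) =====
def Claim_equal_extract_word_ranges_py : Prop := ∀ (text : String), Dom_extract_word_ranges_py text → Spec_extract_word_ranges_py text (extract_word_ranges_py text)

-- ===== LEMMAS AND PROOFS =====

-- A's state machine vs B's run scanner: out of a word A agrees with B from here on;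
-- inside a word A will close it at i + (remaining word length).
theorem pvLoop_agree (cs : List Char) :
    (∀ (i ws : Int) (acc : List (List (String × Int))),
        pvALoop cs i false ws acc = acc ++ pvBLoop cs i) ∧
    (∀ (i ws : Int) (acc : List (List (String × Int))),
        pvALoop cs i true ws acc =
          acc ++ pvARange ws (i + ((pvBWord cs).1 : Int)) :: pvBLoop (pvBWord cs).2 (i + ((pvBWord cs).1 : Int))) := by
  induction cs with
  | nil =>
    constructor
    · intro i ws acc; simp [pvALoop, pvBLoop]
    · intro i ws acc; simp [pvALoop, pvBLoop, pvBWord]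
  | cons c rest ih =>
    obtain ⟨ihF, ihT⟩ := ih
    constructor
    · intro i ws acc
      by_cases h : PySem.Chars.isspace c = true
      · simp [pvALoop, pvBLoop, h, ihF]
      · simp only [pvALoop, pvBLoop, h, Bool.false_eq_true, if_false, ihT]
        simp [pvARange]
    · intro i ws acc
      by_cases h : PySem.Chars.isspace c = true
      · simp [pvALoop, pvBLoop, pvBWord, h, ihF]
      · simp only [pvALoop, h, Bool.false_eq_true, if_false, if_true, ihT]
        have hw : pvBWord (c :: rest) = ((pvBWord rest).1 + 1, (pvBWord rest).2) := by
          simp [pvBWord, h]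
        rw [hw]
        have h2 : i + (((pvBWord rest).1 + 1 : Nat) : Int) = i + 1 + ((pvBWord rest).1 : Int) := by
          push_cast; ring
        rw [h2]

-- ===== VERDICT (by name: the statement is the Claim_ definition above) =====
theorem extract_word_ranges_py_spec : Claim_equal_extract_word_ranges_py := by
  intro text _
  unfold Spec_extract_word_ranges_py extract_word_ranges_py extract_word_ranges_py_alt
  simpa using (pvLoop_agree text.toList).1 0 0 []
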